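-- pv_equiv track=rewrite | github.com/CodingThrust/problem-reductions | docs/paper/verify-reductions/verify_register_sufficiency_sequencing_to_minimize_maximum_cumulative_cost.py | simulate_registers
-- ===== SOURCE A (Python) =====
-- def simulate_registers(num_vertices, arcs, order):
--     """Simulate register usage for evaluation order (list of vertices).
--     Returns max registers used, or None if the ordering is invalid.
--     Matches the Rust RegisterSufficiency::simulate_registers logic.
--     """
--     n = num_vertices
--     if len(order) != n:
--         return None
--
--     positions = {}
--     for idx, vertex in enumerate(order):
--         if vertex in positions:
--             return None
--         positions[vertex] = idx
--
--     if set(positions.keys()) != set(range(n)):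
--         return None
--
--     # Check dependencies
--     for v, u in arcs:
--         if positions[u] >= positions[v]:
--             return None
--
--     # Build dependents
--     dependents = [[] for _ in range(n)]
--     for v, u in arcs:
--         dependents[u].append(v)
--
--     # last_use[u] = position of latest dependent, or n if no dependents
--     last_use = [0] * n
--     for u in range(n):
--         if not dependents[u]:
--             last_use[u] = n
--         else:
--             last_use[u] = max(positions[v] for v in dependents[u])
--
--     max_reg = 0
--     for step in range(n):
--         reg_count = sum(1 for v in order[:step + 1] if last_use[v] > step)
--         max_reg = max(max_reg, reg_count)
--
--     return max_reg
-- ===== SOURCE B (Python) =====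
-- def simulate_registers(num_vertices, arcs, order):
--     """Incremental sweep: +1 register when a vertex is produced, -1 when its
--     last dependent has been evaluated; track the running maximum."""
--     n = num_vertices
--     if len(order) != n or set(order) != set(range(n)):
--         return None
--     pos = {v: i for i, v in enumerate(order)}
--     last = [-1] * n  # -1 = no dependent seen (register lives to the end)
--     for v, u in arcs:
--         pv, pu = pos[v], pos[u]
--         if pu >= pv:
--             return None
--         if pv > last[u]:
--             last[u] = pv
--     freed = [0] * n  # freed[t] = registers released right after step t
--     for u in range(n):
--         if last[u] >= 0:
--             freed[last[u]] += 1
--     reg = max_reg = 0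
--     for step in range(n):
--         reg += 1 - freed[step]
--         if reg > max_reg:
--             max_reg = reg
--     return max_reg
-- ===== Notes on version B (the rewrite author's own statement) =====
-- stated objective: alternative
-- what changed: A rescans the whole evaluated prefix at every step (and builds per-vertex dependent lists) to count live registers; B does one incremental sweep: it folds last-use positions directly over the arcs, bucket-counts how many registers are freed after each step, and updates a running register count and maximum.
-- outside the precondition, e.g. on simulate_registers(2, [(1, 0), (5, 0)], [0, 1]): A raises KeyError, B raises KeyError; on simulate_registers(1, [(0, 0), (5, 0)], [0]): A returns None, B returns None
import Mathlib
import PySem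

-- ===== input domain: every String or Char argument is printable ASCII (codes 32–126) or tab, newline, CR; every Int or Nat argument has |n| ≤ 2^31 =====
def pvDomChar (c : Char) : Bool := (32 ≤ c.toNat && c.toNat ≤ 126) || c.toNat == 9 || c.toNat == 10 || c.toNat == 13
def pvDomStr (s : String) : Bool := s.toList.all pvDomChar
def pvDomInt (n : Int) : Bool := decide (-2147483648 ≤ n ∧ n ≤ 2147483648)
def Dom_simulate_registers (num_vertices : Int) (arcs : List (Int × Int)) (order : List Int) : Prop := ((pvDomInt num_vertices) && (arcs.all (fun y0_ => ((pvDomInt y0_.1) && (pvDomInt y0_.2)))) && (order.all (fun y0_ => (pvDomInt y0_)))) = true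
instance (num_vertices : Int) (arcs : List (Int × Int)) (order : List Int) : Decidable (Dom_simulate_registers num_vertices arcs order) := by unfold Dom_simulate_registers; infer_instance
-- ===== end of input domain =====

-- B replaces A's per-step rescan of the evaluated prefix (and its per-vertex dependent
-- lists) by a single incremental sweep: +1 register on production, -1 after the last dependent.

-- ===== PORT A =====
-- the 'positions' loop of A: insert order[idx] ↦ idx, early return None on a duplicate
def pvBuildPosA (ps : List (Int × Int)) (d : PySem.Dict Int Int) : Option (PySem.Dict Int Int) :=
  match ps with
  | [] => some d
  | (idx, v) :: rest => if d.contains v then none else pvBuildPosA rest (d.insert v idx)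

def simulate_registers (num_vertices : Int) (arcs : List (Int × Int)) (order : List Int) : Option Int :=
  let n := num_vertices
  if (order.length : Int) ≠ n then none
  else
    match pvBuildPosA (PySem.List.enumerate order) PySem.Dict.empty with
    | none => none
    | some positions =>
      -- set(positions.keys()) != set(range(n))
      if !(PySem.Set.equal (PySem.Set.ofList positions.keys) (PySem.Set.ofList (PySem.List.pyRange 0 n))) then none
      -- dependency loop with early return None ≡ any; positions[u] raises KeyError for a key
      -- outside the dict — excluded by Pre_, under which getD is exact
      else if arcs.any (fun vu => positions.getD vu.2 0 ≥ positions.getD vu.1 0) then none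
      else
        let N := order.length
        -- dependents[u].append(v); u ∈ range(n) under Pre_, so the .toNat index is exact
        let dependents := arcs.foldl (fun dep vu => dep.modify vu.2.toNat (fun l => l ++ [vu.1])) (List.replicate N ([] : List Int))
        -- last_use[u] written once per u in increasing u: a map over range(n)
        let last_use := (List.range N).map (fun u =>
          let du := dependents.getD u []
          if du = [] then n
          -- max(positions[v] for v in dependents[u]) on a nonempty du: max? is some
          else (PySem.List.max? (du.map (fun v => positions.getD v 0)) (fun x => x)).getD 0)
        let max_reg := (List.range N).foldl (fun m (step : Nat) =>
          max m ((PySem.List.slice order none (some ((step : Int) + 1))).countP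
                   (fun v => decide (PySem.List.pyGetD last_use v 0 > (step : Int))) : Int)) 0
        some max_reg

-- ===== PORT B =====
-- B's arcs loop: dependency check with early return None, plus running max last[u] = pos[v]
def pvArcsB (arcs : List (Int × Int)) (pos : PySem.Dict Int Int) (last : List Int) : Option (List Int) :=
  match arcs with
  | [] => some last
  | (v, u) :: rest =>
    let pv := pos.getD v 0   -- pos[v]/pos[u]: KeyError outside Pre_, getD exact under Pre_
    let pu := pos.getD u 0
    if pu ≥ pv then none
    else pvArcsB rest pos
      (if pv > PySem.List.pyGetD last u (-1) then last.set u.toNat pv else last)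

def simulate_registers_alt (num_vertices : Int) (arcs : List (Int × Int)) (order : List Int) : Option Int :=
  let n := num_vertices
  if ((order.length : Int) ≠ n) ∨ !(PySem.Set.equal (PySem.Set.ofList order) (PySem.Set.ofList (PySem.List.pyRange 0 n))) then none
  else
    let pos := (PySem.List.enumerate order).foldl (fun d iv => d.insert iv.2 iv.1) PySem.Dict.empty
    let N := order.length
    match pvArcsB arcs pos (List.replicate N (-1 : Int)) with
    | none => none
    | some last =>
      -- freed[last[u]] += 1 when last[u] ≥ 0; indices are in range here
      let freed := (List.range N).foldl (fun fr (u : Nat) =>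
        let lu := PySem.List.pyGetD last (u : Int) (-1)
        if lu ≥ 0 then fr.modify lu.toNat (· + 1) else fr) (List.replicate N (0 : Int))
      let res := (List.range N).foldl (fun (p : Int × Int) (step : Nat) =>
        let reg := p.1 + 1 - PySem.List.pyGetD freed (step : Int) 0
        (reg, if reg > p.2 then reg else p.2)) ((0 : Int), (0 : Int))
      some res.2

-- ===== PRECONDITION & SPEC =====
-- Pre_ excludes inputs whose order is a valid permutation of range(n) while some arc endpoint
-- lies outside 0..n-1: both programs normally raise KeyError there (and when an earlier arc
-- already violates the dependency order both return None, which Pre_ conservatively excludes too).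
def Pre_simulate_registers (num_vertices : Int) (arcs : List (Int × Int)) (order : List Int) : Prop :=
  ((order.length : Int) = num_vertices ∧ order.Nodup ∧ ∀ x ∈ order, 0 ≤ x ∧ x < num_vertices) →
  ∀ p ∈ arcs, (0 ≤ p.1 ∧ p.1 < num_vertices) ∧ (0 ≤ p.2 ∧ p.2 < num_vertices)
instance (num_vertices : Int) (arcs : List (Int × Int)) (order : List Int) : Decidable (Pre_simulate_registers num_vertices arcs order) := by unfold Pre_simulate_registers; infer_instance

def pvWitness_simulate_registers : Int × (List (Int × Int)) × List Int := (3, [(1, 0), (2, 1)], [0, 1, 2])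

def Spec_simulate_registers (num_vertices : Int) (arcs : List (Int × Int)) (order : List Int) (out : Option Int) : Prop := out = simulate_registers_alt num_vertices arcs order
instance (num_vertices : Int) (arcs : List (Int × Int)) (order : List Int) (out : Option Int) : Decidable (Spec_simulate_registers num_vertices arcs order out) := by unfold Spec_simulate_registers; infer_instance

-- ===== CLAIM (what is proved, stated in full; the proofs are below) =====
def Claim_equal_simulate_registers : Prop := ∀ (num_vertices : Int) (arcs : List (Int × Int)) (order : List Int), Dom_simulate_registers num_vertices arcs order → Pre_simulate_registers num_vertices arcs order → Spec_simulate_registers num_vertices arcs order (simulate_registers num_vertices arcs order)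

-- ===== LEMMAS AND PROOFS =====

-- proof-side abbreviations
def pvPos (order : List Int) : PySem.Dict Int Int :=
  (PySem.List.enumerate order).foldl (fun d iv => d.insert iv.2 iv.1) PySem.Dict.empty

def pvG (arcs : List (Int × Int)) (pos : PySem.Dict Int Int) (u : Int) : Int :=
  ((arcs.filter (fun vu => vu.2 == u)).map (fun vu => pos.getD vu.1 0)).foldl max (-1)

def pvLastPure (arcs : List (Int × Int)) (pos : PySem.Dict Int Int) (last : List Int) : List Int :=
  arcs.foldl (fun last vu =>
    let pv := pos.getD vu.1 0
    if pv > PySem.List.pyGetD last vu.2 (-1) then last.set vu.2.toNat pv else last) last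

lemma pv_lastPure_cons (pos : PySem.Dict Int Int) (v w : Int) (rest : List (Int × Int)) (last : List Int) :
    pvLastPure ((v, w) :: rest) pos last = pvLastPure rest pos
      (if pos.getD v 0 > PySem.List.pyGetD last w (-1) then last.set w.toNat (pos.getD v 0) else last) := rfl

lemma pv_getD_set_self {α : Type} (l : List α) (i : Nat) (x : α) (d : α) (h : i < l.length) :
    (l.set i x).getD i d = x := by
  simp [List.getD_eq_getElem?_getD, List.getElem?_set_self, h]
lemma pv_getD_set_ne {α : Type} (l : List α) (i j : Nat) (x : α) (d : α) (h : i ≠ j) :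
    (l.set i x).getD j d = l.getD j d := by
  simp [List.getD_eq_getElem?_getD, List.getElem?_set_ne h]
lemma pv_getD_modify_self {α : Type} (l : List α) (i : Nat) (f : α → α) (d : α) (h : i < l.length) :
    (l.modify i f).getD i d = f (l.getD i d) := by
  simp [List.getD_eq_getElem?_getD, List.getElem?_modify, h, List.getElem?_eq_getElem]
lemma pv_getD_modify_ne {α : Type} (l : List α) (i j : Nat) (f : α → α) (d : α) (h : i ≠ j) :
    (l.modify i f).getD j d = l.getD j d := by
  simp [List.getD_eq_getElem?_getD, List.getElem?_modify, h]

lemma pv_enumerate_cons (x : Int) (xs : List Int) (k : Int) :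
    PySem.List.enumerate (x :: xs) k = (k, x) :: PySem.List.enumerate xs (k + 1) := by
  simp [PySem.List.enumerate]
lemma pv_enumerate_snd (order : List Int) : ∀ (k : Int),
    (PySem.List.enumerate order k).map Prod.snd = order := by
  induction order with
  | nil => intro k; simp [PySem.List.enumerate]
  | cons x xs ih => intro k; rw [pv_enumerate_cons]; simp [ih]
lemma pv_enumerate_mem (order : List Int) : ∀ (k : Int) (i : Nat) (h : i < order.length),
    (k + (i : Int), order[i]) ∈ PySem.List.enumerate order k := by
  induction order with
  | nil => intro k i h; simp at h
  | cons x xs ih =>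
    intro k i h
    rw [pv_enumerate_cons]
    cases i with
    | zero => simp
    | succ j =>
      right
      have := ih (k+1) j (by simpa using h)
      simpa [add_comm, add_assoc, add_left_comm] using this

lemma pv_pos_items (order : List Int) (hnd : order.Nodup) :
    (pvPos order).items = (PySem.List.enumerate order).map (fun iv => (iv.2, iv.1)) := by
  unfold pvPos
  rw [PySem.Dict.items_foldl_insert_fresh (k := Prod.snd) (v := Prod.fst)]
  · simp [PySem.Dict.empty]
  · intro a _; exact PySem.Dict.contains_empty _
  · rw [pv_enumerate_snd]; exact hnd

lemma pv_pos_keys (order : List Int) (hnd : order.Nodup) : (pvPos order).keys = order := by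
  have h := pv_pos_items order hnd
  have : (pvPos order).keys = (pvPos order).items.map Prod.fst := rfl
  rw [this, h]
  simp only [List.map_map]
  exact pv_enumerate_snd order 0

lemma pv_pos_getD (order : List Int) (hnd : order.Nodup) (i : Nat) (h : i < order.length) :
    (pvPos order).getD order[i] 0 = (i : Int) := by
  apply PySem.Dict.getD_of_mem_items
  · rw [pv_pos_items order hnd]
    have := pv_enumerate_mem order 0 i h
    simpa using List.mem_map_of_mem (f := fun iv => (iv.2, iv.1)) this
  · rw [pv_pos_keys order hnd]; exact hnd

lemma pv_pos_getD_mem (order : List Int) (hnd : order.Nodup) (v : Int) (hv : v ∈ order) :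
    0 ≤ (pvPos order).getD v 0 ∧ (pvPos order).getD v 0 < (order.length : Int) := by
  obtain ⟨i, h, rfl⟩ := List.getElem_of_mem hv
  rw [pv_pos_getD order hnd i h]
  constructor <;> omega

lemma pv_pyRange_eq (n : Int) (N : Nat) (h : (N : Int) = n) :
    PySem.List.pyRange 0 n = (List.range N).map (fun k : Nat => (k : Int)) := by
  subst h; exact PySem.List.pyRange_zero_natCast N

lemma pv_arcsB_none_iff (pos : PySem.Dict Int Int) : ∀ (arcs : List (Int × Int)) (last : List Int),
    (pvArcsB arcs pos last = none ↔ arcs.any (fun vu => pos.getD vu.2 0 ≥ pos.getD vu.1 0)) := by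
  intro arcs
  induction arcs with
  | nil => intro last; simp [pvArcsB]
  | cons p rest ih =>
    intro last
    obtain ⟨v, u⟩ := p
    by_cases hc : pos.getD u 0 ≥ pos.getD v 0
    · simp [pvArcsB, hc]
    · simp only [pvArcsB, if_neg hc, List.any_cons]
      rw [ih]
      simp [hc]

lemma pv_arcsB_some (pos : PySem.Dict Int Int) : ∀ (arcs : List (Int × Int)) (last : List Int),
    arcs.any (fun vu => pos.getD vu.2 0 ≥ pos.getD vu.1 0) = false →
    pvArcsB arcs pos last = some (pvLastPure arcs pos last) := by
  intro arcs
  induction arcs with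
  | nil => intro last _; rfl
  | cons p rest ih =>
    intro last h
    obtain ⟨v, u⟩ := p
    simp only [List.any_cons, Bool.or_eq_false_iff] at h
    have hc : ¬ (pos.getD u 0 ≥ pos.getD v 0) := by simpa using h.1
    simp only [pvArcsB, if_neg hc, pvLastPure, List.foldl_cons]
    exact ih _ h.2

lemma pv_lastPure_length (pos : PySem.Dict Int Int) : ∀ (arcs : List (Int × Int)) (last : List Int),
    (pvLastPure arcs pos last).length = last.length := by
  intro arcs
  induction arcs with
  | nil => intro last; rfl
  | cons p rest ih =>
    intro last
    simp only [pvLastPure, List.foldl_cons] at *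
    rw [ih]
    split <;> simp

lemma pv_lastPure_getD (pos : PySem.Dict Int Int) : ∀ (arcs : List (Int × Int)) (last : List Int)
    (u : Nat), u < last.length → (∀ p ∈ arcs, 0 ≤ p.2 ∧ p.2 < (last.length : Int)) →
    (pvLastPure arcs pos last).getD u (-1) =
      ((arcs.filter (fun vu => vu.2 == (u : Int))).map (fun vu => pos.getD vu.1 0)).foldl max (last.getD u (-1)) := by
  intro arcs
  induction arcs with
  | nil => intro last u hu _; rfl
  | cons p rest ih =>
    intro last u hu hb
    obtain ⟨v, w⟩ := p
    have hw : 0 ≤ w ∧ w < (last.length : Int) := hb (v, w) (by simp)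
    set lastnew := (if pos.getD v 0 > PySem.List.pyGetD last w (-1) then last.set w.toNat (pos.getD v 0) else last) with hlastnew
    have hlen : lastnew.length = last.length := by rw [hlastnew]; split <;> simp
    have hread : PySem.List.pyGetD last w (-1) = last.getD w.toNat (-1) :=
      PySem.List.pyGetD_of_nonneg last (-1) hw.1
    have hrec := ih lastnew u (by omega) (by rw [hlen]; intro q hq; exact hb q (by simp [hq]))
    rw [pv_lastPure_cons, hrec]
    by_cases hwu : w = (u : Int)
    · have htn : w.toNat = u := by omega
      have hstep : lastnew.getD u (-1) = max (last.getD u (-1)) (pos.getD v 0) := by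
        rw [hlastnew, hread, htn]
        split
        · rw [pv_getD_set_self _ _ _ _ (by omega)]; omega
        · omega
      rw [List.filter_cons_of_pos (by simp [hwu]), List.map_cons, List.foldl_cons, hstep]
    · have htn : w.toNat ≠ u := by omega
      have hstep : lastnew.getD u (-1) = last.getD u (-1) := by
        rw [hlastnew]; split
        · exact pv_getD_set_ne _ _ _ _ _ htn
        · rfl
      rw [List.filter_cons_of_neg (by simp [hwu]), hstep]

lemma pv_deps_getD : ∀ (arcs : List (Int × Int)) (dep : List (List Int)) (u : Nat), u < dep.length →
    (∀ p ∈ arcs, 0 ≤ p.2 ∧ p.2 < (dep.length : Int)) →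
    (arcs.foldl (fun dep vu => dep.modify vu.2.toNat (fun l => l ++ [vu.1])) dep).getD u [] =
      dep.getD u [] ++ (arcs.filter (fun vu => vu.2 == (u : Int))).map (fun vu => vu.1) := by
  intro arcs
  induction arcs with
  | nil => intro dep u hu _; simp
  | cons p rest ih =>
    intro dep u hu hb
    obtain ⟨v, w⟩ := p
    have hw : 0 ≤ w ∧ w < (dep.length : Int) := hb (v, w) (by simp)
    rw [List.foldl_cons]
    have hrec := ih (dep.modify w.toNat (fun l => l ++ [v])) u (by simpa using hu)
      (by simp only [List.length_modify]; intro q hq; exact hb q (by simp [hq]))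
    rw [hrec]
    by_cases hwu : w = (u : Int)
    · have htn : w.toNat = u := by omega
      rw [List.filter_cons_of_pos (by simp [hwu]), List.map_cons, htn,
        pv_getD_modify_self _ _ _ _ hu]
      simp
    · have htn : w.toNat ≠ u := by omega
      rw [List.filter_cons_of_neg (by simp [hwu]), pv_getD_modify_ne _ _ _ _ _ htn]

lemma pv_freed_getD (G : Nat → Int) : ∀ (l : List Nat) (fr : List Int) (t : Nat), t < fr.length →
    (∀ u ∈ l, G u < (fr.length : Int)) →
    (l.foldl (fun fr u => if G u ≥ 0 then fr.modify (G u).toNat (· + 1) else fr) fr).getD t 0 =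
      fr.getD t 0 + ((l.countP (fun u => G u == (t : Int))) : Int) := by
  intro l
  induction l with
  | nil => intro fr t ht _; simp
  | cons x rest ih =>
    intro fr t ht hb
    rw [List.foldl_cons]
    set frnew := (if G x ≥ 0 then fr.modify (G x).toNat (· + 1) else fr) with hfr
    have hlen : frnew.length = fr.length := by rw [hfr]; split <;> simp
    have hrec := ih frnew t (by omega) (by rw [hlen]; intro q hq; exact hb q (by simp [hq]))
    rw [hrec]
    by_cases hxt : G x = (t : Int)
    · have hx0 : G x ≥ 0 := by omega
      have htn : (G x).toNat = t := by omega
      rw [List.countP_cons_of_pos (p := fun u => G u == (t : Int)) (by simpa using hxt)]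
      rw [hfr, if_pos hx0, htn, pv_getD_modify_self _ _ _ _ ht]
      push_cast; ring
    · rw [List.countP_cons_of_neg (p := fun u => G u == (t : Int)) (by simpa using hxt)]
      have hstep : frnew.getD t 0 = fr.getD t 0 := by
        rw [hfr]; split
        · next hx0 =>
          exact pv_getD_modify_ne _ _ _ _ _ (by omega)
        · rfl
      rw [hstep]

lemma pv_countP_split_lt (g : Int → Int) (k : Int) (hk : 0 ≤ k) : ∀ (l : List Int),
    l.countP (fun u => decide (0 ≤ g u ∧ g u < k)) + l.countP (fun u => g u == k) =
      l.countP (fun u => decide (0 ≤ g u ∧ g u < k + 1)) := by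
  intro l
  induction l with
  | nil => simp
  | cons x rest ih =>
    simp only [List.countP_cons]
    rw [← ih]
    by_cases hx0 : 0 ≤ g x <;> by_cases hxk : g x < k <;> by_cases hxk1 : g x = k <;>
      simp only [decide_eq_true_eq, beq_iff_eq, hx0, hxk, hxk1, true_and, and_true,
        false_and, and_false, if_true, if_false] <;> (try split_ifs) <;> omega

lemma pv_buildPosA_some (ps : List (Int × Int)) : ∀ (d : PySem.Dict Int Int),
    (ps.map Prod.snd).Nodup → (∀ p ∈ ps, d.contains p.2 = false) →
    pvBuildPosA ps d = some (ps.foldl (fun d iv => d.insert iv.2 iv.1) d) := by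
  induction ps with
  | nil => intro d _ _; rfl
  | cons p rest ih =>
    intro d hnd hfresh
    obtain ⟨idx, v⟩ := p
    have hv : d.contains v = false := hfresh (idx, v) (by simp)
    simp only [pvBuildPosA, hv, if_neg Bool.false_ne_true, List.foldl_cons]
    apply ih
    · simpa using hnd.of_cons
    · intro q hq
      rw [PySem.Dict.contains_insert]
      have h1 : q.2 ≠ v := by
        simp only [List.map_cons, List.nodup_cons] at hnd
        intro he; exact hnd.1 (by rw [← he]; exact List.mem_map_of_mem hq)
      simp [h1, hfresh q (by simp [hq])]

lemma pv_buildPosA_isSome (ps : List (Int × Int)) : ∀ (d : PySem.Dict Int Int) (d' : PySem.Dict Int Int),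
    pvBuildPosA ps d = some d' → (ps.map Prod.snd).Nodup ∧ ∀ p ∈ ps, d.contains p.2 = false := by
  induction ps with
  | nil => intro d d' _; simp
  | cons p rest ih =>
    intro d d' h
    obtain ⟨idx, v⟩ := p
    by_cases hv : d.contains v
    · simp [pvBuildPosA, hv] at h
    · simp only [pvBuildPosA, hv, if_neg Bool.false_ne_true] at h
      · obtain ⟨hnd, hfresh⟩ := ih _ _ h
        constructor
        · simp only [List.map_cons, List.nodup_cons]
          refine ⟨?_, hnd⟩
          intro hmem
          obtain ⟨q, hq, he⟩ := List.mem_map.mp hmem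
          have := hfresh q hq
          rw [PySem.Dict.contains_insert] at this
          simp [he] at this
        · intro q hq
          rcases List.mem_cons.mp hq with h1 | h1
          · simp [h1]; simpa using hv
          · have := hfresh q h1
            rw [PySem.Dict.contains_insert] at this
            exact (Bool.or_eq_false_iff.mp this).2

-- generic: B's (reg, max) pair fold versus A's max-of-counts fold
lemma pv_pairfold (D C : Nat → Int) (N : Nat)
    (h : ∀ k, k < N → C k = (List.range (k+1)).foldl (fun s t => s + 1 - D t) 0) :
    ((List.range N).foldl (fun (p : Int × Int) step =>
        (p.1 + 1 - D step, if p.1 + 1 - D step > p.2 then p.1 + 1 - D step else p.2)) (0, 0)).2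
      = (List.range N).foldl (fun m step => max m (C step)) 0 := by
  suffices haux : ∀ j, j ≤ N →
      ((List.range j).foldl (fun (p : Int × Int) step =>
        (p.1 + 1 - D step, if p.1 + 1 - D step > p.2 then p.1 + 1 - D step else p.2)) (0, 0))
      = ((List.range j).foldl (fun s t => s + 1 - D t) 0,
         (List.range j).foldl (fun m step => max m (C step)) 0) by
    rw [haux N (le_refl N)]
  intro j
  induction j with
  | zero => intro _; rfl
  | succ i ih =>
    intro hij
    rw [List.range_succ, List.foldl_append, List.foldl_append, List.foldl_append,
      ih (by omega)]
    simp only [List.foldl_cons, List.foldl_nil]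
    have hc := h i (by omega)
    rw [List.range_succ, List.foldl_append] at hc
    simp only [List.foldl_cons, List.foldl_nil] at hc
    rw [hc]
    congr 1
    rcases le_or_gt ((List.range i).foldl (fun s t => s + 1 - D t) 0 + 1 - D i)
      ((List.range i).foldl (fun m step => max m (C step)) 0) with hle | hgt
    · rw [if_neg (by omega), max_eq_left (by omega)]
    · rw [if_pos (by omega), max_eq_right (by omega)]

-- generic: closed form of B's register recurrence
lemma pv_S_closed (g : Int → Int) (order : List Int) (D : Nat → Int) (N : Nat)
    (hD : ∀ t, t < N → D t = (order.countP (fun v => g v == (t : Int)) : Int)) :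
    ∀ j, j ≤ N → (List.range j).foldl (fun s t => s + 1 - D t) 0 =
      (j : Int) - (order.countP (fun v => decide (0 ≤ g v ∧ g v < (j : Int))) : Int) := by
  intro j
  induction j with
  | zero =>
    intro _
    simp only [List.range_zero, List.foldl_nil, Nat.cast_zero, zero_sub]
    have : order.countP (fun v => decide (0 ≤ g v ∧ g v < (0 : Int))) = 0 := by
      rw [List.countP_eq_zero]
      intro v _
      simp only [decide_eq_true_eq]
      omega
    rw [this]
    simp
  | succ i ih =>
    intro hij
    rw [List.range_succ, List.foldl_append]
    simp only [List.foldl_cons, List.foldl_nil]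
    rw [ih (by omega), hD i (by omega)]
    have hsplit := pv_countP_split_lt g (i : Int) (by omega) order
    have : ((i : Nat) + 1 : Int) = (i : Int) + 1 := by push_cast; ring
    push_cast
    omega

-- generic: A's per-step count of still-live registers, in closed form
lemma pv_C_eq (g f : Int → Int) (order : List Int) (k N : Nat)
    (hkN : k < N) (hNlen : order.length = N)
    (hf : ∀ v ∈ order, (0 ≤ g v ∧ g v < (N : Int) ∧ f v = g v) ∨ (g v = -1 ∧ f v = (N : Int)))
    (hfpos : ∀ (i : Nat) (h : i < order.length), f order[i] > (i : Int)) :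
    ((order.take (k+1)).countP (fun v => decide (f v > (k : Int))) : Int) =
      ((k : Int) + 1) - (order.countP (fun v => decide (0 ≤ g v ∧ g v < (k : Int) + 1)) : Int) := by
  have hlen_take : (order.take (k+1)).length = k+1 := by
    rw [List.length_take]; omega
  have hqdrop : (order.drop (k+1)).countP (fun v => decide (0 ≤ g v ∧ g v < (k : Int) + 1)) = 0 := by
    rw [List.countP_eq_zero]
    intro v hv
    simp only [decide_eq_true_eq]
    obtain ⟨i, hi, rfl⟩ := List.mem_iff_getElem.mp hv
    rw [List.getElem_drop]
    have hlt : k + 1 + i < order.length := by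
      simp only [List.length_drop] at hi; omega
    have h1 := hfpos (k+1+i) hlt
    rcases hf order[k+1+i] (List.getElem_mem hlt) with ⟨_, _, h3⟩ | ⟨h2, _⟩
    · rw [h3] at h1; push_cast at h1 ⊢; omega
    · omega
  have hqorder : order.countP (fun v => decide (0 ≤ g v ∧ g v < (k : Int) + 1)) =
      (order.take (k+1)).countP (fun v => decide (0 ≤ g v ∧ g v < (k : Int) + 1)) := by
    conv_lhs => rw [← List.take_append_drop (k+1) order]
    rw [List.countP_append, hqdrop]
    omega
  have hcnt := List.length_eq_countP_add_countP (fun v => decide (f v > (k : Int)))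
    (l := order.take (k+1))
  rw [hlen_take] at hcnt
  have hpoint : (order.take (k+1)).countP (fun a => decide (¬ (decide (f a > (k : Int))) = true)) =
      (order.take (k+1)).countP (fun v => decide (0 ≤ g v ∧ g v < (k : Int) + 1)) := by
    apply List.countP_congr
    intro v hv
    have hvo : v ∈ order := List.take_subset _ _ hv
    have hkNi : (k : Int) < (N : Int) := by exact_mod_cast hkN
    rcases hf v hvo with ⟨h1, h2, h3⟩ | ⟨h1, h2⟩
    · simp only [decide_eq_true_eq, decide_eq_decide, h3]
      constructor <;> intro <;> omega
    · simp only [decide_eq_true_eq, decide_eq_decide, h2, h1]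
      constructor <;> intro <;> omega
  rw [hpoint] at hcnt
  rw [hqorder]
  omega

-- permutation/validity facts extracted from the shared set-equality test
lemma pv_set_valid (nv : Int) (order : List Int)
    (hlen : (order.length : Int) = nv)
    (hset : PySem.Set.equal (PySem.Set.ofList order) (PySem.Set.ofList (PySem.List.pyRange 0 nv)) = true) :
    order.Nodup ∧ (∀ x : Int, x ∈ order ↔ 0 ≤ x ∧ x < nv) ∧
      order.Perm ((List.range order.length).map (fun k : Nat => (k : Int))) := by
  have hrange := pv_pyRange_eq nv order.length hlen
  have hmem0 : ∀ x : Int, x ∈ order ↔ x ∈ (List.range order.length).map (fun k : Nat => (k : Int)) := by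
    intro x
    have := (PySem.Set.equal_iff _ _).mp hset x
    rw [PySem.Set.mem_ofList, PySem.Set.mem_ofList, hrange] at this
    exact this
  have hrnd : ((List.range order.length).map (fun k : Nat => (k : Int))).Nodup :=
    (List.nodup_range).map (fun a b hab => by omega)
  have hsub : ((List.range order.length).map (fun k : Nat => (k : Int))) ⊆ order := by
    intro x hx; exact (hmem0 x).mpr hx
  have hperm : ((List.range order.length).map (fun k : Nat => (k : Int))).Perm order :=
    (List.subperm_of_subset hrnd hsub).perm_of_length_le (by simp)
  refine ⟨hperm.symm.nodup_iff.mpr hrnd, ?_, hperm.symm⟩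
  intro x
  rw [hmem0 x]
  simp only [List.mem_map, List.mem_range]
  constructor
  · rintro ⟨k, hk, rfl⟩; omega
  · intro hx; exact ⟨x.toNat, by omega, by omega⟩

-- ===== VERDICT (by name: the statement is the Claim_ definition above) =====
theorem simulate_registers_spec : Claim_equal_simulate_registers := by
  intro nv arcs order _hdom hpre
  unfold Spec_simulate_registers
  simp only [simulate_registers, simulate_registers_alt]
  by_cases hlen : (order.length : Int) = nv
  case neg =>
    rw [if_pos hlen, if_pos (Or.inl hlen)]
  case pos =>
    rw [if_neg (by simpa using hlen)]
    by_cases hset : PySem.Set.equal (PySem.Set.ofList order) (PySem.Set.ofList (PySem.List.pyRange 0 nv)) = true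
    case neg =>
      -- B returns none; A returns none through one of its two checks
      have hsetf : PySem.Set.equal (PySem.Set.ofList order) (PySem.Set.ofList (PySem.List.pyRange 0 nv)) = false := by
        revert hset; cases PySem.Set.equal (PySem.Set.ofList order) (PySem.Set.ofList (PySem.List.pyRange 0 nv)) <;> simp
      rw [if_pos (Or.inr (by rw [hsetf]; rfl))]
      by_cases hnd : order.Nodup
      · have hbuild : pvBuildPosA (PySem.List.enumerate order) PySem.Dict.empty = some (pvPos order) :=
          pv_buildPosA_some _ _ (by rw [pv_enumerate_snd]; exact hnd)
            (fun p _ => PySem.Dict.contains_empty _)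
        rw [hbuild]
        dsimp only
        rw [pv_pos_keys order hnd, if_pos (by rw [hsetf]; rfl)]
      · cases hres : pvBuildPosA (PySem.List.enumerate order) PySem.Dict.empty with
        | none => rfl
        | some d =>
          exfalso
          have h2 := (pv_buildPosA_isSome _ _ _ hres).1
          rw [pv_enumerate_snd] at h2
          exact hnd h2
    case pos =>
      obtain ⟨hnd, hmem, hperm⟩ := pv_set_valid nv order hlen hset
      rw [if_neg (by simp [hset, hlen])]
      have hbuild : pvBuildPosA (PySem.List.enumerate order) PySem.Dict.empty = some (pvPos order) :=
        pv_buildPosA_some _ _ (by rw [pv_enumerate_snd]; exact hnd)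
          (fun p _ => PySem.Dict.contains_empty _)
      rw [hbuild]
      dsimp only
      rw [pv_pos_keys order hnd]
      rw [if_neg (by simp [hset])]
      have harc := hpre ⟨hlen, hnd, fun x hx => (hmem x).1 hx⟩
      rw [show List.foldl (fun d iv => d.insert iv.2 iv.1) PySem.Dict.empty (PySem.List.enumerate order) = pvPos order from rfl]
      by_cases hviol : arcs.any (fun vu => (pvPos order).getD vu.2 0 ≥ (pvPos order).getD vu.1 0) = true
      · rw [if_pos hviol, (pv_arcsB_none_iff (pvPos order) arcs _).mpr hviol]
      · rw [if_neg hviol, pv_arcsB_some (pvPos order) arcs _ (by simpa using hviol)]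
        dsimp only
        refine congrArg some ?_
        set N := order.length with hN
        set deps := List.foldl (fun dep vu => dep.modify vu.2.toNat fun l => l ++ [vu.1]) (List.replicate N ([] : List Int)) arcs with hdeps
        set lastB := pvLastPure arcs (pvPos order) (List.replicate N (-1 : Int)) with hlastB
        set lastUse := List.map (fun u =>
            if deps.getD u [] = [] then nv
            else (PySem.List.max? (List.map (fun v => (pvPos order).getD v 0) (deps.getD u [])) fun x => x).getD 0)
          (List.range N) with hlastUse
        set freedE := List.foldl (fun fr (u : Nat) =>
            if PySem.List.pyGetD lastB (↑u) (-1) ≥ 0 then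
              fr.modify (PySem.List.pyGetD lastB (↑u) (-1)).toNat fun x => x + 1
            else fr) (List.replicate N (0 : Int)) (List.range N) with hfreedE
        -- basic facts
        have hNnv : ((N : Nat) : Int) = nv := hlen
        have hmemN : ∀ x ∈ order, 0 ≤ x ∧ x < (N : Int) := by
          intro x hx; have := (hmem x).mp hx; omega
        have harcN : ∀ p ∈ arcs, (0 ≤ p.1 ∧ p.1 < (N : Int)) ∧ (0 ≤ p.2 ∧ p.2 < (N : Int)) := by
          intro p hp; have := harc p hp; omega
        have harcmem : ∀ p ∈ arcs, p.1 ∈ order ∧ p.2 ∈ order := by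
          intro p hp
          have h1 := (harc p hp).1
          have h2 := (harc p hp).2
          exact ⟨(hmem p.1).mpr h1, (hmem p.2).mpr h2⟩
        have hnov : ∀ p ∈ arcs, (pvPos order).getD p.1 0 > (pvPos order).getD p.2 0 := by
          intro p hp
          rw [Bool.not_eq_true, List.any_eq_false] at hviol
          have := hviol p hp
          simp only [decide_eq_true_eq] at this
          omega
        have hGcases : ∀ v : Int, pvG arcs (pvPos order) v = -1 ∨
            ∃ p, p ∈ arcs ∧ pvG arcs (pvPos order) v = (pvPos order).getD p.1 0 ∧ p.2 = v := by
          intro v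
          rcases PySem.List.foldl_max_mem
            ((arcs.filter (fun vu => vu.2 == v)).map (fun vu => (pvPos order).getD vu.1 0)) (-1) with h | h
          · left; exact h
          · right
            obtain ⟨p, hpf, hpe⟩ := List.mem_map.mp h
            have hm := List.mem_filter.mp hpf
            exact ⟨p, hm.1, hpe.symm, by simpa using hm.2⟩
        have hGlow : ∀ v : Int, -1 ≤ pvG arcs (pvPos order) v := by
          intro v
          exact (PySem.List.le_foldl_max _ (-1)).1
        have hGhigh : ∀ v : Int, pvG arcs (pvPos order) v < (N : Int) := by
          intro v
          rcases hGcases v with h | ⟨p, hp, heq, _⟩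
          · have : (0:Int) ≤ (N : Int) := Int.natCast_nonneg N
            omega
          · rw [heq]
            exact (pv_pos_getD_mem order hnd p.1 (harcmem p hp).1).2
        have hlastBlen : lastB.length = N := by
          rw [hlastB, pv_lastPure_length]; simp
        have hlastBget : ∀ u : Nat, u < N → lastB.getD u (-1) = pvG arcs (pvPos order) (↑u) := by
          intro u hu
          rw [hlastB, pv_lastPure_getD (pvPos order) arcs (List.replicate N (-1)) u (by simp only [List.length_replicate]; exact hu)
            (by simp only [List.length_replicate]; intro p hp; exact (harcN p hp).2)]
          rw [List.getD_replicate]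
          · rfl
          · exact hu
        -- characterization of A's last_use lookups
        have hfval : ∀ v ∈ order,
            (0 ≤ pvG arcs (pvPos order) v ∧ pvG arcs (pvPos order) v < (N : Int) ∧
              PySem.List.pyGetD lastUse v 0 = pvG arcs (pvPos order) v) ∨
            (pvG arcs (pvPos order) v = -1 ∧ PySem.List.pyGetD lastUse v 0 = (N : Int)) := by
          intro v hv
          obtain ⟨h0v, hvN⟩ := hmemN v hv
          have hvn : v.toNat < N := by omega
          have htn : ((v.toNat : Nat) : Int) = v := Int.toNat_of_nonneg h0v
          have hgetlu : PySem.List.pyGetD lastUse v 0 =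
              (if deps.getD v.toNat [] = [] then nv
               else (PySem.List.max? (List.map (fun w => (pvPos order).getD w 0) (deps.getD v.toNat [])) fun x => x).getD 0) := by
            rw [PySem.List.pyGetD_of_nonneg _ _ h0v, hlastUse,
              PySem.List.getD_map_range _ _ _ _ hvn]
          have hdepsv : deps.getD v.toNat [] = (arcs.filter (fun vu => vu.2 == v)).map (fun vu => vu.1) := by
            rw [hdeps, pv_deps_getD arcs (List.replicate N ([] : List Int)) v.toNat (by simp only [List.length_replicate]; exact hvn)
              (by simp only [List.length_replicate]; intro p hp; exact (harcN p hp).2)]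
            rw [List.getD_replicate, htn]
            · simp
            · exact hvn
          have hGv : pvG arcs (pvPos order) v =
              ((arcs.filter (fun vu => vu.2 == v)).map (fun vu => (pvPos order).getD vu.1 0)).foldl max (-1) := rfl
          cases hfe : arcs.filter (fun vu => vu.2 == v) with
          | nil =>
            right
            constructor
            · rw [hGv, hfe]; rfl
            · rw [hgetlu, hdepsv, hfe]
              rw [show (List.map (fun vu => vu.1) ([] : List (Int × Int))) = ([] : List Int) from rfl, if_pos rfl, ← hNnv]
          | cons a t =>
            left
            have hamem : a ∈ arcs := List.mem_of_mem_filter (by rw [hfe]; exact List.mem_cons_self)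
            have hpa := pv_pos_getD_mem order hnd a.1 (harcmem a hamem).1
            have hGv2 : pvG arcs (pvPos order) v =
                (t.map (fun vu => (pvPos order).getD vu.1 0)).foldl max ((pvPos order).getD a.1 0) := by
              rw [hGv, hfe, List.map_cons, List.foldl_cons, max_eq_right (by omega)]
            have hfv : PySem.List.pyGetD lastUse v 0 =
                (t.map (fun vu => (pvPos order).getD vu.1 0)).foldl max ((pvPos order).getD a.1 0) := by
              rw [hgetlu, hdepsv, hfe, if_neg (by simp), List.map_cons, List.map_cons, List.map_map]
              rw [PySem.List.max?_id_cons]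
              rfl
            refine ⟨?_, ?_, by rw [hfv, hGv2]⟩
            · have := (PySem.List.le_foldl_max (t.map (fun vu => (pvPos order).getD vu.1 0)) ((pvPos order).getD a.1 0)).1
              rw [hGv2]; omega
            · rw [hGv2]
              rcases PySem.List.foldl_max_mem (t.map (fun vu => (pvPos order).getD vu.1 0)) ((pvPos order).getD a.1 0) with h | h
              · rw [h]; omega
              · obtain ⟨b, hbt, hbe⟩ := List.mem_map.mp h
                have hbarcs : b ∈ arcs := List.mem_of_mem_filter (by rw [hfe]; exact List.mem_cons_of_mem _ hbt)
                rw [← hbe]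
                exact (pv_pos_getD_mem order hnd b.1 (harcmem b hbarcs).1).2
        have hfpos : ∀ (i : Nat) (hi : i < order.length), PySem.List.pyGetD lastUse order[i] 0 > (i : Int) := by
          intro i hi
          have hvmem : order[i] ∈ order := List.getElem_mem hi
          have hposi : (pvPos order).getD order[i] 0 = (i : Int) := pv_pos_getD order hnd i hi
          rcases hfval order[i] hvmem with ⟨hg0, hgN, hfg⟩ | ⟨hg1, hfn⟩
          · rw [hfg]
            rcases hGcases order[i] with hc | ⟨p, hp, heq, hp2⟩
            · omega
            · rw [heq]
              have hgt := hnov p hp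
              rw [hp2, hposi] at hgt
              exact hgt
          · rw [hfn]
            have : (i : Int) < (N : Int) := by exact_mod_cast hi
            omega
        have hD : ∀ t : Nat, t < N → PySem.List.pyGetD freedE (↑t) 0 =
            ((order.countP (fun v => pvG arcs (pvPos order) v == (t : Int))) : Int) := by
          intro t ht
          have hcongr : freedE = List.foldl (fun fr (u : Nat) =>
              if pvG arcs (pvPos order) (↑u) ≥ 0 then
                fr.modify (pvG arcs (pvPos order) (↑u)).toNat (fun x => x + 1) else fr)
              (List.replicate N (0 : Int)) (List.range N) := by
            rw [hfreedE]
            apply PySem.List.foldl_congr_mem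
            intro acc u hu
            rw [PySem.List.pyGetD_of_nonneg _ _ (by exact_mod_cast Nat.zero_le u), Int.toNat_natCast,
              hlastBget u (List.mem_range.mp hu)]
          rw [hcongr, PySem.List.pyGetD_of_nonneg _ _ (by exact_mod_cast Nat.zero_le t), Int.toNat_natCast]
          rw [pv_freed_getD (fun u => pvG arcs (pvPos order) (↑u)) (List.range N) (List.replicate N 0) t
            (by simp only [List.length_replicate]; exact ht)
            (by simp only [List.length_replicate]; intro u _; exact hGhigh (↑u))]
          rw [List.getD_replicate]
          · rw [zero_add]
            congr 1
            have hpc := hperm.countP_eq (fun v => pvG arcs (pvPos order) v == (t : Int))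
            rw [List.countP_map] at hpc
            exact hpc.symm
          · exact ht
        refine Eq.symm (pv_pairfold (fun step => PySem.List.pyGetD freedE (↑step) 0)
          (fun step => ((List.countP (fun v => decide (PySem.List.pyGetD lastUse v 0 > (step : Int)))
            (PySem.List.slice order none (some ((step : Int) + 1)))) : Int)) N ?_)
        intro k hk
        beta_reduce
        have hC := pv_C_eq (fun v => pvG arcs (pvPos order) v) (fun v => PySem.List.pyGetD lastUse v 0)
          order k N hk rfl hfval hfpos
        rw [PySem.List.slice_to order (by omega : (0:Int) ≤ (k : Int) + 1)]
        rw [show ((k : Int) + 1).toNat = k + 1 from by omega]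
        rw [pv_S_closed (fun v => pvG arcs (pvPos order) v) order
          (fun t => PySem.List.pyGetD freedE (↑t) 0) N hD (k+1) (by omega)]
        push_cast at hC ⊢
        rw [hC]
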